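-- pv_equiv track=rewrite | github.com/martinlackner/shortlisting | shortlisting.py | compute_sizeandkgap
-- ===== SOURCE A (Python) =====
-- def compute_sizeandkgap(scores, size, gap, minimumsize=True):
--     """..."""
--     scores_sorted = sorted(scores, reverse=True)
--     kgaps = [
--         i
--         for i in range(len(scores) - 1)
--         if scores_sorted[i] - scores_sorted[i + 1] >= gap
--     ]
--     if not kgaps:
--         committee = list(range(len(scores)))
--     else:
--         firstkgap = min(kgaps)
--         threshold = scores_sorted[firstkgap]
--         committee = [c for c in range(len(scores)) if scores[c] >= threshold]
--     if minimumsize and len(committee) < size: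
--         return compute_sizepriority(scores, size)
--     if not minimumsize and len(committee) > size:
--         return compute_sizepriority(scores, size)
--     return committee
--
-- def compute_sizepriority(scores, size):
--     """Returns the list of winning committees
--     according to the Size Priority rule"""
--     scores_sorted = sorted(scores, reverse=True)
--     if isinstance(size, list):
--         priority = size
--     else:
--         priority = sorted(list(range(size, len(scores) + 1)))
--     for psize in priority:
--         threshold = scores_sorted[psize - 1]
--         committee = [c for c in range(len(scores)) if scores[c] >= threshold]
--         if len(committee) == psize:
--             return committee
--
--     raise AssertionError(
--         "This should not happen. \
--                          Size Priority found no committee."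
--     )
-- ===== SOURCE B (Python) =====
-- def compute_sizeandkgap(scores, size, gap, minimumsize=True):
--     n = len(scores)
--     sd = sorted(scores, reverse=True)
--     threshold = None
--     for a, b in zip(sd, sd[1:]):
--         if a - b >= gap:
--             threshold = a
--             break
--     if threshold is None:
--         committee = list(range(n))
--     else:
--         committee = [c for c in range(n) if scores[c] >= threshold]
--     k = len(committee)
--     if (minimumsize and k < size) or (not minimumsize and k > size):
--         # size-priority: smallest committee size p >= max(size, 1) with no tie
--         # across the boundary; found by one scan over the sorted scores.
--         p = max(size, 1)
--         while p < n and sd[p - 1] == sd[p]: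
--             p += 1
--         t = sd[p - 1]
--         return [c for c in range(n) if scores[c] >= t]
--     return committee
-- ===== Notes on version B (the rewrite author's own statement) =====
-- stated objective: alternative
-- what changed: The Size Priority fallback no longer rebuilds and counts a committee for every candidate size: B skips non-positive sizes outright and finds the first qualifying size with a single tie-skipping walk over the sorted scores, and the first qualifying gap is found by one zip-scan of adjacent sorted scores instead of a full index-comprehension plus min().
import Mathlib
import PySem

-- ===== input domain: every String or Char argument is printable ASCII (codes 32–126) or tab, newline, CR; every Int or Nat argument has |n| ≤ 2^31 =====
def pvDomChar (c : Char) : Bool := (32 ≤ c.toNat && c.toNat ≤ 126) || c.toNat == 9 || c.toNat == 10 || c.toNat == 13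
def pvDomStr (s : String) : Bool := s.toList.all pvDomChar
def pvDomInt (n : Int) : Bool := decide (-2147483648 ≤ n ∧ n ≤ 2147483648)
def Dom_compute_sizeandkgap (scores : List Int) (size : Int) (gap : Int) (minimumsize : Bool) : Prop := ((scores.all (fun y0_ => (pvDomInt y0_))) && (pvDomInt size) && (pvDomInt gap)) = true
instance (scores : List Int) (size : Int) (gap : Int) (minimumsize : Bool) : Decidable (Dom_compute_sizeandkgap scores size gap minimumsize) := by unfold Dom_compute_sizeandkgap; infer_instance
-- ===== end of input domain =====

-- B replaces A's Size Priority fallback (which rebuilds a committee for every candidate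
-- size) by a single tie-skipping walk over the sorted scores; objective: alternative algorithm.

-- ===== PORT A =====
-- '[c for c in range(len(scores)) if scores[c] >= threshold]' (appears verbatim in A's two functions)
def sizekgapCommittee (scores : List Int) (threshold : Int) : List Int :=
  (PySem.List.pyRange 0 (scores.length : Int) 1).filter
    (fun c => decide (PySem.List.pyGetD scores c 0 ≥ threshold))

-- the 'for psize in priority' loop of compute_sizepriority; none = fell through (AssertionError)
-- or scores_sorted[psize - 1] raised IndexError
def spLoop (scores scores_sorted : List Int) : List Int → Option (List Int)
  | [] => none
  | psize :: rest =>
    match PySem.List.pyGet? scores_sorted (psize - 1) with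
    | none => none
    | some threshold =>
      let committee := sizekgapCommittee scores threshold
      if (committee.length : Int) = psize then some committee else spLoop scores scores_sorted rest

-- 'size' is an int in this typing, so the isinstance(size, list) branch is never taken
def compute_sizepriority (scores : List Int) (size : Int) : List Int :=
  let scores_sorted := PySem.List.sorted scores (fun x => x) true
  let priority := PySem.List.sorted (PySem.List.pyRange size ((scores.length : Int) + 1) 1) (fun x => x) false
  match spLoop scores scores_sorted priority with
  | some committee => committee
  | none => []  -- Python raises here (AssertionError / IndexError); excluded by Pre_

def compute_sizeandkgap (scores : List Int) (size : Int) (gap : Int) (minimumsize : Bool) : List Int :=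
  let scores_sorted := PySem.List.sorted scores (fun x => x) true
  let kgaps := (PySem.List.pyRange 0 ((scores.length : Int) - 1) 1).filter
    (fun i => decide (PySem.List.pyGetD scores_sorted i 0 - PySem.List.pyGetD scores_sorted (i + 1) 0 ≥ gap))
  let committee :=
    if kgaps = [] then PySem.List.pyRange 0 (scores.length : Int) 1
    else
      match PySem.List.min? kgaps (fun x => x) with
      | some firstkgap => sizekgapCommittee scores (PySem.List.pyGetD scores_sorted firstkgap 0)
      | none => []  -- unreachable: Python's min() on the nonempty kgaps
  if minimumsize && decide ((committee.length : Int) < size) then compute_sizepriority scores size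
  else if !minimumsize && decide ((committee.length : Int) > size) then compute_sizepriority scores size
  else committee

-- ===== PORT B =====
-- Source B's '[c for c in range(n) if scores[c] >= t]' — the same comprehension as in A
def altCommittee (scores : List Int) (threshold : Int) : List Int :=
  (PySem.List.pyRange 0 (scores.length : Int) 1).filter
    (fun c => decide (PySem.List.pyGetD scores c 0 ≥ threshold))

-- 'for a, b in zip(sd, sd[1:]): if a - b >= gap: threshold = a; break'
def altFirstGap (gap : Int) : List Int → Option Int
  | a :: b :: rest => if a - b ≥ gap then some a else altFirstGap gap (b :: rest)
  | _ => none

-- 'while p < n and sd[p - 1] == sd[p]: p += 1'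
def altBump (sd : List Int) (n p : Int) : Int :=
  if h : p < n then
    if PySem.List.pyGetD sd (p - 1) 0 = PySem.List.pyGetD sd p 0 then altBump sd n (p + 1) else p
  else p
termination_by (n - p).toNat
decreasing_by omega

def compute_sizeandkgap_alt (scores : List Int) (size : Int) (gap : Int) (minimumsize : Bool) : List Int :=
  let n : Int := scores.length
  let sd := PySem.List.sorted scores (fun x => x) true
  let committee :=
    match altFirstGap gap sd with
    | none => PySem.List.pyRange 0 n 1
    | some threshold => altCommittee scores threshold
  if (minimumsize && decide ((committee.length : Int) < size)) ||
     (!minimumsize && decide ((committee.length : Int) > size)) then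
    let p := altBump sd n (max size 1)
    altCommittee scores (PySem.List.pyGetD sd (p - 1) 0)
  else committee

-- ===== PRECONDITION & SPEC =====
-- Pre_ excludes exactly the inputs on which the Python A raises: when the size-priority
-- fallback is reached, A raises AssertionError if its candidate-size range is empty
-- (minimumsize with size > len(scores)) and IndexError on empty scores or on
-- size ≤ -len(scores) (scores_sorted[psize - 1] is out of range even with Python's
-- negative indexing); on every other input A returns normally.
def Pre_compute_sizeandkgap (scores : List Int) (size : Int) (gap : Int) (minimumsize : Bool) : Prop :=
  (minimumsize = true → size ≤ 0 ∨ (scores ≠ [] ∧ size ≤ (scores.length : Int))) ∧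
  (minimumsize = false → (scores.length : Int) ≤ size ∨ (scores ≠ [] ∧ 1 - (scores.length : Int) ≤ size))
instance (scores : List Int) (size : Int) (gap : Int) (minimumsize : Bool) : Decidable (Pre_compute_sizeandkgap scores size gap minimumsize) := by unfold Pre_compute_sizeandkgap; infer_instance

def pvWitness_compute_sizeandkgap : List Int × Int × Int × Bool := ([5, 2, 4, 2], 2, 2, true)

def Spec_compute_sizeandkgap (scores : List Int) (size : Int) (gap : Int) (minimumsize : Bool) (out : List Int) : Prop := out = compute_sizeandkgap_alt scores size gap minimumsize
instance (scores : List Int) (size : Int) (gap : Int) (minimumsize : Bool) (out : List Int) : Decidable (Spec_compute_sizeandkgap scores size gap minimumsize out) := by unfold Spec_compute_sizeandkgap; infer_instance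

-- ===== CLAIM (what is proved, stated in full; the proofs are below) =====
def Claim_equal_compute_sizeandkgap : Prop := ∀ (scores : List Int) (size : Int) (gap : Int) (minimumsize : Bool), Dom_compute_sizeandkgap scores size gap minimumsize → Pre_compute_sizeandkgap scores size gap minimumsize → Spec_compute_sizeandkgap scores size gap minimumsize (compute_sizeandkgap scores size gap minimumsize)

-- ===== LEMMAS AND PROOFS =====

-- proof-side index list of A's 'kgaps' comprehension, over Nat indices
def kgapIdx (gap : Int) (l : List Int) : List Nat :=
  (List.range (l.length - 1)).filter (fun i => decide (l.getD i 0 - l.getD (i + 1) 0 ≥ gap))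

theorem min?_eq_head_of_pairwise_lt (l : List Int) (h : l.Pairwise (· < ·)) :
    PySem.List.min? l (fun x => x) = l.head? := by
  cases l with
  | nil => simp [PySem.List.min?]
  | cons a t =>
    rw [PySem.List.min?_id_cons]
    have hmem := PySem.List.foldl_min_mem t a
    have hle := (PySem.List.foldl_min_le t a).1
    rcases hmem with he | hm
    · simp [he]
    · have : a < t.foldl min a := (List.pairwise_cons.mp h).1 _ hm
      omega

theorem kgaps_eq_map_kgapIdx (gap : Int) (l : List Int) :
    (PySem.List.pyRange 0 ((l.length : Int) - 1) 1).filter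
      (fun i => decide (PySem.List.pyGetD l i 0 - PySem.List.pyGetD l (i + 1) 0 ≥ gap))
      = (kgapIdx gap l).map (fun k : Nat => (k : Int)) := by
  rcases Nat.eq_zero_or_pos l.length with h0 | hpos
  · simp [kgapIdx, h0]
  · have hc : ((l.length : Int) - 1) = ((l.length - 1 : Nat) : Int) := by omega
    rw [hc, PySem.List.pyRange_zero_nat, List.filter_map]
    unfold kgapIdx
    apply congrArg
    apply List.filter_congr
    intro k hk
    have h1 : ((k : Int) + 1) = ((k + 1 : Nat) : Int) := by push_cast; ring
    simp only [Function.comp, h1, PySem.List.pyGetD_natCast]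

theorem altFirstGap_eq_head_kgapIdx (gap : Int) (l : List Int) :
    altFirstGap gap l = (kgapIdx gap l).head?.map (fun i => l.getD i 0) := by
  induction l using altFirstGap.induct gap with
  | case1 a b rest hgap =>
    simp [altFirstGap, kgapIdx, hgap, List.range_succ_eq_map]
  | case2 a b rest hgap ih =>
    rw [altFirstGap]
    simp only [if_neg hgap, ih]
    unfold kgapIdx
    simp only [List.length_cons, Nat.add_sub_cancel, List.range_succ_eq_map, List.filter_cons]
    have h0 : ¬ (decide ((a :: b :: rest).getD 0 0 - (a :: b :: rest).getD 1 0 ≥ gap) = true) := by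
      simpa using hgap
    rw [if_neg h0, List.filter_map]
    have hpred : ((fun i => decide ((a :: b :: rest).getD i 0 - (a :: b :: rest).getD (i+1) 0 ≥ gap)) ∘ Nat.succ)
        = (fun i => decide ((b :: rest).getD i 0 - (b :: rest).getD (i+1) 0 ≥ gap)) := by
      funext i; simp [Function.comp, List.getD]
    rw [hpred]
    have hlen : rest.length = (b :: rest).length - 1 := by simp
    rw [hlen]
    cases hK : ((List.range ((b :: rest).length - 1)).filter (fun i => decide ((b :: rest).getD i 0 - (b :: rest).getD (i+1) 0 ≥ gap))) with
    | nil => simp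
    | cons k ks => simp [List.getD]
  | case3 x hx =>
    cases x with
    | nil => simp [altFirstGap, kgapIdx]
    | cons a t =>
      cases t with
      | nil => simp [altFirstGap, kgapIdx]
      | cons b r => exact absurd rfl (hx a b r)

theorem take_all_ge (sd : List Int) (h : sd.Pairwise (fun a b => b ≤ a)) (j : Nat)
    (hj : j < sd.length) : ∀ x ∈ sd.take (j + 1), sd.getD j 0 ≤ x := by
  intro x hx
  rw [List.mem_take_iff_getElem] at hx
  obtain ⟨i, hi, rfl⟩ := hx
  have hget := List.pairwise_iff_getElem.mp h
  rw [List.getD_eq_getElem sd 0 hj]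
  rcases Nat.lt_or_ge i j with hlt | hge
  · exact hget i j (by omega) hj hlt
  · have : i = j := by omega
    subst this; exact le_refl _

theorem countP_ge_eq (sd : List Int) (h : sd.Pairwise (fun a b => b ≤ a)) (j : Nat)
    (hj : j < sd.length)
    (hb : j + 1 = sd.length ∨ sd.getD (j + 1) 0 < sd.getD j 0) :
    sd.countP (fun x => decide (x ≥ sd.getD j 0)) = j + 1 := by
  have hsplit : sd = sd.take (j + 1) ++ sd.drop (j + 1) := (List.take_append_drop _ _).symm
  have htlen : (sd.take (j + 1)).length = j + 1 := by simp; omega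
  have htake : (sd.take (j + 1)).countP (fun x => decide (x ≥ sd.getD j 0)) = j + 1 := by
    rw [List.countP_eq_length.mpr, htlen]
    intro a ha
    simpa using take_all_ge sd h j hj a ha
  have hdrop : (sd.drop (j + 1)).countP (fun x => decide (x ≥ sd.getD j 0)) = 0 := by
    rw [List.countP_eq_zero]
    intro a ha
    rw [List.mem_drop_iff_getElem] at ha
    obtain ⟨i, hi, rfl⟩ := ha
    have hget := List.pairwise_iff_getElem.mp h
    rcases hb with hb | hb
    · omega
    · have h1 : sd[j+1+i] ≤ sd.getD (j+1) 0 := by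
        rw [List.getD_eq_getElem sd 0 (by omega)]
        rcases Nat.eq_zero_or_pos i with h0 | h0
        · subst h0; simp
        · exact hget (j+1) (j+1+i) (by omega) (by omega) (by omega)
      simp only [decide_eq_true_eq, ge_iff_le, not_le]
      omega
  set t := sd.getD j 0 with ht
  conv_lhs => rw [hsplit]
  rw [List.countP_append, htake, hdrop]

theorem countP_ge_gt (sd : List Int) (h : sd.Pairwise (fun a b => b ≤ a)) (j : Nat)
    (hj : j + 1 < sd.length) (heq : sd.getD j 0 = sd.getD (j + 1) 0) :
    j + 1 < sd.countP (fun x => decide (x ≥ sd.getD j 0)) := by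
  have hsplit : sd = sd.take (j + 2) ++ sd.drop (j + 2) := (List.take_append_drop _ _).symm
  have htlen : (sd.take (j + 2)).length = j + 2 := by simp; omega
  have htake : (sd.take (j + 2)).countP (fun x => decide (x ≥ sd.getD j 0)) = j + 2 := by
    rw [List.countP_eq_length.mpr, htlen]
    intro a ha
    rw [List.mem_take_iff_getElem] at ha
    obtain ⟨i, hi, rfl⟩ := ha
    have hget := List.pairwise_iff_getElem.mp h
    simp only [decide_eq_true_eq, ge_iff_le]
    rw [List.getD_eq_getElem sd 0 (by omega)]
    rcases Nat.lt_or_ge i (j+1) with hlt | hge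
    · rcases Nat.lt_or_ge i j with h2 | h2
      · exact hget i j (by omega) (by omega) h2
      · have : i = j := by omega
        subst this; exact le_refl _
    · have : i = j + 1 := by omega
      subst this
      rw [List.getD_eq_getElem sd 0 (by omega), List.getD_eq_getElem sd 0 (by omega)] at heq
      omega
  set t := sd.getD j 0 with ht
  conv_rhs => rw [hsplit]
  rw [List.countP_append, htake]
  omega

theorem committee_length (scores : List Int) (t : Int) :
    (sizekgapCommittee scores t).length = scores.countP (fun x => decide (x ≥ t)) := by
  have h2 : scores.countP (fun x => decide (x ≥ t))
      = (PySem.List.pyRange 0 (scores.length : Int) 1).countP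
          (fun c => decide (PySem.List.pyGetD scores c 0 ≥ t)) := by
    conv_lhs => rw [← PySem.List.map_pyGetD_pyRange_zero' scores 0]
    rw [List.countP_map]
    rfl
  rw [h2]
  unfold sizekgapCommittee
  rw [← List.countP_eq_length_filter]

theorem committee_pos (scores : List Int) (t : Int) (h : t ∈ scores) :
    0 < (sizekgapCommittee scores t).length := by
  rw [committee_length, List.countP_pos_iff]
  exact ⟨t, h, by simp⟩

theorem spLoop_append (scores sd : List Int) (l1 l2 : List Int)
    (h : ∀ p ∈ l1, ∃ t, PySem.List.pyGet? sd (p - 1) = some t ∧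
        ((sizekgapCommittee scores t).length : Int) ≠ p) :
    spLoop scores sd (l1 ++ l2) = spLoop scores sd l2 := by
  induction l1 with
  | nil => rfl
  | cons p rest ih =>
    obtain ⟨t, ht, hne⟩ := h p (by simp)
    rw [List.cons_append, spLoop, ht]
    simp only [if_neg hne]
    exact ih (fun q hq => h q (by simp [hq]))

theorem spLoop_scan (scores sd : List Int) (hperm : sd.Perm scores)
    (hpair : sd.Pairwise (fun a b => b ≤ a)) (hlen : sd.length = scores.length) :
    ∀ (m : Nat) (p : Int), 1 ≤ p → p ≤ (scores.length : Int) →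
      ((scores.length : Int) - p).toNat = m →
      spLoop scores sd (PySem.List.pyRange p ((scores.length : Int) + 1) 1)
        = some (sizekgapCommittee scores
            (PySem.List.pyGetD sd (altBump sd (scores.length : Int) p - 1) 0)) := by
  intro m
  induction m with
  | zero =>
    intro p h1 h2 hm
    have hpn : p = (scores.length : Int) := by omega
    subst hpn
    have hbump : altBump sd (scores.length : Int) (scores.length : Int) = (scores.length : Int) := by
      rw [altBump, dif_neg (lt_irrefl _)]
    rw [hbump]
    have hj : ((scores.length : Int) - 1).toNat < sd.length := by omega
    rw [PySem.List.pyRange_one_cons (by omega), spLoop,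
      PySem.List.pyGet?_eq_some_getElem sd (by omega) (by rw [hlen]; omega)]
    have hcnt : (sizekgapCommittee scores sd[((scores.length:Int) - 1).toNat]).length
        = ((scores.length : Int) - 1).toNat + 1 := by
      rw [committee_length, ← hperm.countP_eq, ← List.getD_eq_getElem sd 0 hj]
      exact countP_ge_eq sd hpair _ hj (Or.inl (by omega))
    dsimp only
    rw [if_pos (by rw [hcnt]; omega),
      PySem.List.pyGetD_eq_getElem sd 0 (by omega) (by rw [hlen]; omega)]
  | succ m ih =>
    intro p h1 h2 hm
    have hplt : p < (scores.length : Int) := by omega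
    set n : Int := (scores.length : Int) with hn
    have hj : (p - 1).toNat < sd.length := by omega
    have hj1 : (p - 1).toNat + 1 = p.toNat := by omega
    have hgd : PySem.List.pyGetD sd (p - 1) 0 = sd.getD (p - 1).toNat 0 := by
      rw [PySem.List.pyGetD_eq_getElem sd 0 (by omega) (by omega), List.getD_eq_getElem sd 0 hj]
    have hgd2 : PySem.List.pyGetD sd p 0 = sd.getD ((p - 1).toNat + 1) 0 := by
      rw [PySem.List.pyGetD_eq_getElem sd 0 (by omega) (by omega), hj1,
        List.getD_eq_getElem sd 0 (by omega)]
    rw [PySem.List.pyRange_one_cons (by omega), spLoop,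
      PySem.List.pyGet?_eq_some_getElem sd (by omega) (by omega)]
    have hget : sd[(p-1).toNat] = sd.getD (p - 1).toNat 0 := (List.getD_eq_getElem sd 0 hj).symm
    dsimp only
    by_cases htie : sd.getD (p - 1).toNat 0 = sd.getD ((p - 1).toNat + 1) 0
    · have hbump : altBump sd n p = altBump sd n (p + 1) := by
        rw [altBump, dif_pos hplt, if_pos (by rw [hgd, hgd2]; exact htie)]
      have hcnt : (p : Int) < ((sizekgapCommittee scores sd[(p-1).toNat]).length : Int) := by
        rw [committee_length, ← hperm.countP_eq, hget]
        have := countP_ge_gt sd hpair (p-1).toNat (by omega) htie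
        omega
      rw [if_neg (by omega), hbump]
      exact ih (p + 1) (by omega) (by omega) (by omega)
    · have hbump : altBump sd n p = p := by
        rw [altBump, dif_pos hplt, if_neg (by rw [hgd, hgd2]; exact htie)]
      have hcnt : (sizekgapCommittee scores sd[(p-1).toNat]).length = (p - 1).toNat + 1 := by
        rw [committee_length, ← hperm.countP_eq, hget]
        apply countP_ge_eq sd hpair _ hj
        right
        have hge := List.pairwise_iff_getElem.mp hpair (p-1).toNat ((p-1).toNat + 1)
          (by omega) (by omega) (by omega)
        rw [← List.getD_eq_getElem sd 0 hj, ← List.getD_eq_getElem sd 0 (by omega)] at hge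
        omega
      rw [if_pos (by rw [hcnt]; omega), hbump,
        PySem.List.pyGetD_eq_getElem sd 0 (by omega) (by omega), hget]

theorem sizepriority_eq (scores : List Int) (size : Int) (hne : scores ≠ [])
    (h2 : 1 - (scores.length : Int) ≤ size) (h3 : size ≤ (scores.length : Int)) :
    compute_sizepriority scores size
      = sizekgapCommittee scores
          (PySem.List.pyGetD (PySem.List.sorted scores (fun x => x) true)
            (altBump (PySem.List.sorted scores (fun x => x) true) (scores.length : Int) (max size 1) - 1) 0) := by
  set sd := PySem.List.sorted scores (fun x => x) true with hsd
  have hperm : sd.Perm scores := PySem.List.sorted_perm scores (fun x => x) true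
  have hpair : sd.Pairwise (fun a b => b ≤ a) := PySem.List.sorted_pairwise_rev scores (fun x => x)
  have hlen : sd.length = scores.length := PySem.List.length_sorted scores (fun x => x) true
  have hn1 : 1 ≤ scores.length := List.length_pos_iff.mpr hne
  unfold compute_sizepriority
  dsimp only
  rw [← hsd]
  rw [PySem.List.sorted_eq_self_of_pairwise _ _
    ((PySem.List.pairwise_lt_pyRange_one size ((scores.length : Int) + 1)).imp (fun h => le_of_lt h))]
  by_cases hsz : 1 ≤ size
  · have hmax : max size 1 = size := by omega
    rw [hmax, spLoop_scan scores sd hperm hpair hlen ((scores.length : Int) - size).toNat size hsz h3 rfl]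
  · have hmax : max size 1 = 1 := by omega
    rw [PySem.List.pyRange_one_append size 1 ((scores.length : Int) + 1) (by omega) (by omega)]
    rw [spLoop_append scores sd _ _ ?skip]
    · rw [hmax, spLoop_scan scores sd hperm hpair hlen ((scores.length : Int) - 1).toNat 1
        (by omega) (by omega) rfl]
    case skip =>
      intro p hp
      rw [PySem.List.mem_pyRange_one] at hp
      have hin : PySem.Raise.InRange sd.length (p - 1) := by
        constructor <;> omega
      cases hpg : PySem.List.pyGet? sd (p - 1) with
      | none => exact absurd ((PySem.List.pyGet?_eq_none_iff sd (p - 1)).mp hpg) (by simp [hin])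
      | some t =>
        refine ⟨t, rfl, ?_⟩
        have htm : t ∈ scores := hperm.mem_iff.mp (PySem.List.mem_of_pyGet?_eq_some sd hpg)
        have := committee_pos scores t htm
        omega

theorem committee_main_eq (scores : List Int) (gap : Int) :
    (if ((PySem.List.pyRange 0 ((scores.length : Int) - 1) 1).filter
        (fun i => decide (PySem.List.pyGetD (PySem.List.sorted scores (fun x => x) true) i 0
          - PySem.List.pyGetD (PySem.List.sorted scores (fun x => x) true) (i + 1) 0 ≥ gap))) = []
     then PySem.List.pyRange 0 (scores.length : Int) 1
     else
       match PySem.List.min? ((PySem.List.pyRange 0 ((scores.length : Int) - 1) 1).filter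
        (fun i => decide (PySem.List.pyGetD (PySem.List.sorted scores (fun x => x) true) i 0
          - PySem.List.pyGetD (PySem.List.sorted scores (fun x => x) true) (i + 1) 0 ≥ gap))) (fun x => x) with
       | some firstkgap => sizekgapCommittee scores
           (PySem.List.pyGetD (PySem.List.sorted scores (fun x => x) true) firstkgap 0)
       | none => [])
    = (match altFirstGap gap (PySem.List.sorted scores (fun x => x) true) with
       | none => PySem.List.pyRange 0 (scores.length : Int) 1
       | some threshold => altCommittee scores threshold) := by
  set sd := PySem.List.sorted scores (fun x => x) true with hsd
  have hlen : sd.length = scores.length := PySem.List.length_sorted scores (fun x => x) true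
  have hkg : (PySem.List.pyRange 0 ((scores.length : Int) - 1) 1).filter
        (fun i => decide (PySem.List.pyGetD sd i 0 - PySem.List.pyGetD sd (i + 1) 0 ≥ gap))
      = (kgapIdx gap sd).map (fun k : Nat => (k : Int)) := by
    have h := kgaps_eq_map_kgapIdx gap sd
    rwa [show ((sd.length : Int) - 1) = ((scores.length : Int) - 1) by rw [hlen]] at h
  rw [hkg, altFirstGap_eq_head_kgapIdx]
  cases hK : kgapIdx gap sd with
  | nil => simp
  | cons k0 ks =>
    rw [if_neg (by simp)]
    have hpw : ((kgapIdx gap sd).map (fun k : Nat => (k : Int))).Pairwise (· < ·) := by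
      rw [← hkg]
      exact List.Pairwise.filter _ (PySem.List.pairwise_lt_pyRange_one 0 ((scores.length : Int) - 1))
    rw [min?_eq_head_of_pairwise_lt _ (by rw [hK] at hpw; exact hpw)]
    simp only [List.map_cons, List.head?_cons, Option.map_some]
    rw [PySem.List.pyGetD_natCast]
    rfl

theorem committee_le_length (scores : List Int) (gap : Int) :
    (match altFirstGap gap (PySem.List.sorted scores (fun x => x) true) with
       | none => PySem.List.pyRange 0 (scores.length : Int) 1
       | some threshold => altCommittee scores threshold).length ≤ scores.length := by
  cases altFirstGap gap (PySem.List.sorted scores (fun x => x) true) with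
  | none => simp [PySem.List.length_pyRange_one]
  | some t =>
    calc (altCommittee scores t).length
        ≤ (PySem.List.pyRange 0 (scores.length : Int) 1).length := List.length_filter_le _ _
      _ = scores.length := by simp [PySem.List.length_pyRange_one]

-- ===== VERDICT (by name: the statement is the Claim_ definition above) =====
theorem compute_sizeandkgap_spec : Claim_equal_compute_sizeandkgap := by
  intro scores size gap minimumsize _hdom hpre
  unfold Spec_compute_sizeandkgap
  unfold compute_sizeandkgap compute_sizeandkgap_alt
  simp only []
  rw [committee_main_eq scores gap]
  set committee := (match altFirstGap gap (PySem.List.sorted scores (fun x => x) true) with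
       | none => PySem.List.pyRange 0 (scores.length : Int) 1
       | some threshold => altCommittee scores threshold) with hcomm
  have hcl : committee.length ≤ scores.length := by
    rw [hcomm]; exact committee_le_length scores gap
  cases minimumsize with
  | true =>
    simp only [Bool.true_and, Bool.not_true, Bool.false_and, Bool.or_false, if_neg (by simp : ¬ (false = true))]
    by_cases hlt : (committee.length : Int) < size
    · rw [if_pos (by simpa using hlt), if_pos (by simpa using hlt)]
      have hgt0 : 1 ≤ size := by omega
      rcases hpre.1 rfl with h | ⟨hne, hle⟩
      · omega
      · exact sizepriority_eq scores size hne (by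
          have := List.length_pos_iff.mpr hne; omega) hle
    · rw [if_neg (by simpa using hlt), if_neg (by simpa using hlt)]
  | false =>
    simp only [Bool.false_and, Bool.not_false, Bool.true_and, Bool.false_or, if_neg (by simp : ¬ (false = true))]
    by_cases hgt : (committee.length : Int) > size
    · rw [if_pos (by simpa using hgt), if_pos (by simpa using hgt)]
      have hlt : size < (scores.length : Int) := by omega
      rcases hpre.2 rfl with h | ⟨hne, hge⟩
      · omega
      · exact sizepriority_eq scores size hne hge (by omega)
    · rw [if_neg (by simpa using hgt), if_neg (by simpa using hgt)]
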